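-- pv_equiv track=rewrite | github.com/greensigteam/greensig-backend | api/services/geo_io.py | detect_object_type_from_geometry
-- ===== SOURCE A (Python) =====
-- from typing import List, Dict, Any, Optional, Tuple
--
-- GEOMETRY_TYPE_MAPPING = {
--     # Vegetation - Point
--     'Arbre': 'Point',
--     'Palmier': 'Point',
--     # Vegetation - Polygon
--     'Gazon': 'Polygon',
--     'Arbuste': 'Polygon',
--     'Vivace': 'Polygon',
--     'Cactus': 'Polygon',
--     'Graminee': 'Polygon',
--     # Hydraulic - Point
--     'Puit': 'Point',
--     'Pompe': 'Point',
--     'Vanne': 'Point',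
--     'Clapet': 'Point',
--     'Ballon': 'Point',
--     # Hydraulic - LineString
--     'Canalisation': 'LineString',
--     'Aspersion': 'LineString',
--     'Goutte': 'LineString',
--     # Spatial hierarchy
--     'Site': 'Polygon',
--     'SousSite': 'Point',
-- }
--
-- def detect_object_type_from_geometry(geometry_type: str) -> List[str]:
--     """
--     Suggest possible object types based on geometry type.
--
--     Args:
--         geometry_type: GeoJSON geometry type
--
--     Returns:
--         List of compatible object types
--     """
--     result = []
--     for obj_type, geom_type in GEOMETRY_TYPE_MAPPING.items():
--         if geom_type == geometry_type:
--             result.append(obj_type)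
--         # Also include types that can be converted
--         elif geometry_type == 'MultiPolygon' and geom_type == 'Polygon':
--             result.append(obj_type)
--         elif geometry_type == 'MultiLineString' and geom_type == 'LineString':
--             result.append(obj_type)
--         elif geometry_type == 'MultiPoint' and geom_type == 'Point':
--             result.append(obj_type)
--         elif geometry_type in ('Polygon', 'MultiPolygon') and geom_type == 'Point':
--             result.append(obj_type)  # Can use centroid
--
--     return result
-- ===== SOURCE B (Python) =====
-- # Precomputed lookup table: geometry type -> compatible object types (in mapping order).
-- _POINT_TYPES = ['Arbre', 'Palmier', 'Puit', 'Pompe', 'Vanne', 'Clapet', 'Ballon', 'SousSite']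
-- _LINE_TYPES = ['Canalisation', 'Aspersion', 'Goutte']
-- _POLY_TYPES = ['Arbre', 'Palmier', 'Gazon', 'Arbuste', 'Vivace', 'Cactus', 'Graminee',
--                'Puit', 'Pompe', 'Vanne', 'Clapet', 'Ballon', 'Site', 'SousSite']
--
-- COMPATIBLE_OBJECT_TYPES = {
--     'Point': _POINT_TYPES,
--     'MultiPoint': _POINT_TYPES,
--     'LineString': _LINE_TYPES,
--     'MultiLineString': _LINE_TYPES,
--     'Polygon': _POLY_TYPES,
--     'MultiPolygon': _POLY_TYPES,
-- }
--
-- def detect_object_type_from_geometry(geometry_type: str):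
--     # Single O(1) table lookup; unknown geometry types get no suggestions.
--     return list(COMPATIBLE_OBJECT_TYPES.get(geometry_type, []))
-- ===== Notes on version B (the rewrite author's own statement) =====
-- stated objective: simpler
-- what changed: Replaced the per-entry scan of the mapping with an elif chain by a precomputed table keyed directly by geometry type, so the function body is a single dict lookup with no loop at all.
import Mathlib
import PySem

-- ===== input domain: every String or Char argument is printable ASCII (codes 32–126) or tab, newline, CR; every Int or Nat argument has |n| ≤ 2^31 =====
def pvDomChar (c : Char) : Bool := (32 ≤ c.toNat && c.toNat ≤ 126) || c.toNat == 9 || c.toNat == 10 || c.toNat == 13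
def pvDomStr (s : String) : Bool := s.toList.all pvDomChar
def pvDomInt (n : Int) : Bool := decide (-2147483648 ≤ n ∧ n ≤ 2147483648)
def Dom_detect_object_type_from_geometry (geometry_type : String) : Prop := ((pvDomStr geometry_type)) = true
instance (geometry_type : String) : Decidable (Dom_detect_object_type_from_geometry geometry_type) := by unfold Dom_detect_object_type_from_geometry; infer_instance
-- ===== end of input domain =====

-- B replaces A's loop over the mapping (with a five-way elif chain per entry) by a
-- single lookup in a precomputed geometry-type → object-types table (objective: simpler).

-- ===== PORT A =====
-- GEOMETRY_TYPE_MAPPING as an association list in insertion order (A's module constant)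
def pvGeometryTypeMapping : List (String × String) :=
  [("Arbre", "Point"), ("Palmier", "Point"),
   ("Gazon", "Polygon"), ("Arbuste", "Polygon"), ("Vivace", "Polygon"),
   ("Cactus", "Polygon"), ("Graminee", "Polygon"),
   ("Puit", "Point"), ("Pompe", "Point"), ("Vanne", "Point"),
   ("Clapet", "Point"), ("Ballon", "Point"),
   ("Canalisation", "LineString"), ("Aspersion", "LineString"), ("Goutte", "LineString"),
   ("Site", "Polygon"), ("SousSite", "Point")]

def detect_object_type_from_geometry (geometry_type : String) : List String :=
  pvGeometryTypeMapping.foldl (fun result p =>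
    if p.2 == geometry_type then result ++ [p.1]
    else if geometry_type == "MultiPolygon" && p.2 == "Polygon" then result ++ [p.1]
    else if geometry_type == "MultiLineString" && p.2 == "LineString" then result ++ [p.1]
    else if geometry_type == "MultiPoint" && p.2 == "Point" then result ++ [p.1]
    else if (geometry_type == "Polygon" || geometry_type == "MultiPolygon") && p.2 == "Point" then result ++ [p.1]
    else result) []

-- ===== PORT B =====
def pvPointTypes : List String :=
  ["Arbre", "Palmier", "Puit", "Pompe", "Vanne", "Clapet", "Ballon", "SousSite"]
def pvLineTypes : List String :=
  ["Canalisation", "Aspersion", "Goutte"]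
def pvPolyTypes : List String :=
  ["Arbre", "Palmier", "Gazon", "Arbuste", "Vivace", "Cactus", "Graminee",
   "Puit", "Pompe", "Vanne", "Clapet", "Ballon", "Site", "SousSite"]

def pvCompatibleObjectTypes : PySem.Dict String (List String) :=
  PySem.Dict.ofList
    [("Point", pvPointTypes), ("MultiPoint", pvPointTypes),
     ("LineString", pvLineTypes), ("MultiLineString", pvLineTypes),
     ("Polygon", pvPolyTypes), ("MultiPolygon", pvPolyTypes)]

def detect_object_type_from_geometry_alt (geometry_type : String) : List String :=
  PySem.Dict.getD pvCompatibleObjectTypes geometry_type []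

-- ===== PRECONDITION & SPEC =====
def Spec_detect_object_type_from_geometry (geometry_type : String) (out : List String) : Prop := out = detect_object_type_from_geometry_alt geometry_type
instance (geometry_type : String) (out : List String) : Decidable (Spec_detect_object_type_from_geometry geometry_type out) := by unfold Spec_detect_object_type_from_geometry; infer_instance

-- ===== CLAIM (what is proved, stated in full; the proofs are below) =====
def Claim_equal_detect_object_type_from_geometry : Prop := ∀ (geometry_type : String), Dom_detect_object_type_from_geometry geometry_type → Spec_detect_object_type_from_geometry geometry_type (detect_object_type_from_geometry geometry_type)

-- ===== LEMMAS AND PROOFS =====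

-- ===== VERDICT (by name: the statement is the Claim_ definition above) =====
theorem detect_object_type_from_geometry_spec : Claim_equal_detect_object_type_from_geometry := by
  intro g _
  unfold Spec_detect_object_type_from_geometry
  by_cases h1 : g = "MultiPolygon"
  · subst h1; decide
  by_cases h2 : g = "MultiLineString"
  · subst h2; decide
  by_cases h3 : g = "MultiPoint"
  · subst h3; decide
  by_cases h4 : g = "Polygon"
  · subst h4; decide
  by_cases h5 : g = "Point"
  · subst h5; decide
  by_cases h6 : g = "LineString"
  · subst h6; decide
  -- generic case: no table key matches and none of A's branches fires; both sides are []
  have h1' : ("MultiPolygon" == g) = false := beq_eq_false_iff_ne.mpr (fun h => h1 h.symm)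
  have h1b : (g == "MultiPolygon") = false := beq_eq_false_iff_ne.mpr h1
  have h1p : ¬("MultiPolygon" = g) := fun h => h1 h.symm
  have h2' : ("MultiLineString" == g) = false := beq_eq_false_iff_ne.mpr (fun h => h2 h.symm)
  have h2b : (g == "MultiLineString") = false := beq_eq_false_iff_ne.mpr h2
  have h2p : ¬("MultiLineString" = g) := fun h => h2 h.symm
  have h3' : ("MultiPoint" == g) = false := beq_eq_false_iff_ne.mpr (fun h => h3 h.symm)
  have h3b : (g == "MultiPoint") = false := beq_eq_false_iff_ne.mpr h3
  have h3p : ¬("MultiPoint" = g) := fun h => h3 h.symm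
  have h4' : ("Polygon" == g) = false := beq_eq_false_iff_ne.mpr (fun h => h4 h.symm)
  have h4b : (g == "Polygon") = false := beq_eq_false_iff_ne.mpr h4
  have h4p : ¬("Polygon" = g) := fun h => h4 h.symm
  have h5' : ("Point" == g) = false := beq_eq_false_iff_ne.mpr (fun h => h5 h.symm)
  have h5b : (g == "Point") = false := beq_eq_false_iff_ne.mpr h5
  have h5p : ¬("Point" = g) := fun h => h5 h.symm
  have h6' : ("LineString" == g) = false := beq_eq_false_iff_ne.mpr (fun h => h6 h.symm)
  have h6b : (g == "LineString") = false := beq_eq_false_iff_ne.mpr h6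
  have h6p : ¬("LineString" = g) := fun h => h6 h.symm
  simp [detect_object_type_from_geometry, detect_object_type_from_geometry_alt,
        pvGeometryTypeMapping, pvCompatibleObjectTypes, PySem.Dict.getD, PySem.Dict.ofList,
        PySem.Dict.get?, PySem.Dict.update, PySem.Dict.empty, PySem.Dict.insert, PySem.Dict.contains, List.find?, List.foldl,
        h1, h2, h3, h4, h5, h6, h1', h2', h3', h4', h5', h6', h1b, h2b, h3b, h4b, h5b, h6b,
        h1p, h2p, h3p, h4p, h5p, h6p]
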